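-- pv_equiv track=rewrite | github.com/ebull53/AWS_Connect_Integrations | Slack Slash Command/slash_Command_function.py | getStatusCount
-- ===== SOURCE A (Python) =====
-- def getStatusCount(list):
--     availableCount = 0
--     offlineCount = 0
--     apprenticeCount = 0
--     biweeklyCount = 0
--     break_lunchCount = 0
--     gbplusCount = 0
--     maxprepsCount = 0
--     interviewCount = 0
--     meetingCount = 0
--     orientationCount = 0
--     projectsCount = 0
--     shadowCount = 0
--     tweetersCount = 0
--     closersexpertCount = 0
--     followUpCount = 0
--     connectingCount = 0
--     connectedCount = 0
--     endedCount = 0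
--     # Check the table for status counts ( could by done in a more efficient way using an array )
--     for item in list:
--         if item['Agent Status'] == 'Available':
--             availableCount += 1
--         elif item['Agent Status'] == 'Offline':
--             offlineCount += 1
--         elif item['Agent Status'] == 'Apprenticeship':
--             apprenticeCount += 1
--         elif item['Agent Status'] == 'Bi-weekly':
--             biweeklyCount += 1
--         elif item['Agent Status'] == 'Break/Lunch':
--             break_lunchCount += 1
--         elif item['Agent Status'] == 'GB+':
--             gbplusCount += 1
--         elif item['Agent Status'] == 'MaxPreps':
--             maxprepsCount += 1
--         elif item['Agent Status'] == 'Interview':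
--             interviewCount += 1
--         elif item['Agent Status'] == 'Meetings':
--             meetingCount += 1
--         elif item['Agent Status'] == 'Orientation':
--             orientationCount += 1
--         elif item['Agent Status'] == 'Projects':
--             projectsCount += 1
--         elif item['Agent Status'] == 'Shadowing':
--             shadowCount += 1
--         elif item['Agent Status'] == 'Tweeters':
--             tweetersCount += 1
--         elif item['Agent Status'] == 'Closer/Expert Calls':
--             closersexpertCount += 1
--         elif item['Agent Status'] == 'Follow-Up Work':
--             followUpCount += 1
--         elif item['Agent Status'] == 'CONNECTING':
--             connectingCount += 1
--         elif item['Agent Status'] == 'CONNECTED' or item['Agent Status'] == 'CONNECTED_ONHOLD':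
--             connectedCount += 1
--         elif item['Agent Status'] == 'ENDED':
--             endedCount += 1
--     # Group counts
--     totals = {'Projects': projectsCount, 'Tweeters': tweetersCount, 'Closer/Expert Calls': closersexpertCount, 'Follow-Up Work': endedCount+followUpCount,  'On a Call': connectingCount +
--               connectedCount, 'Available':  availableCount, 'Offline': offlineCount, 'Shadowing':  shadowCount, 'Break/Lunch':  break_lunchCount, 'Apprenticeship': apprenticeCount, 'Meetings': meetingCount}
--     return totals
-- ===== SOURCE B (Python) =====
-- # B: table-driven staged passes - extract the status column once, then count
-- # each group's member statuses with list.count, instead of A's one-pass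
-- # 18-variable elif accumulator chain.
-- GROUPS = [
--     ('Projects', ['Projects']),
--     ('Tweeters', ['Tweeters']),
--     ('Closer/Expert Calls', ['Closer/Expert Calls']),
--     ('Follow-Up Work', ['ENDED', 'Follow-Up Work']),
--     ('On a Call', ['CONNECTING', 'CONNECTED', 'CONNECTED_ONHOLD']),
--     ('Available', ['Available']),
--     ('Offline', ['Offline']),
--     ('Shadowing', ['Shadowing']),
--     ('Break/Lunch', ['Break/Lunch']),
--     ('Apprenticeship', ['Apprenticeship']),
--     ('Meetings', ['Meetings']),
-- ]
--
-- def getStatusCount(list):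
--     statuses = [item['Agent Status'] for item in list]
--     return {key: sum(statuses.count(s) for s in members) for key, members in GROUPS}
-- ===== Notes on version B (the rewrite author's own statement) =====
-- stated objective: simpler
-- what changed: Replaces A's one-pass 18-variable elif accumulator chain with a declarative group table: the status column is extracted once and each output key is computed by per-member list.count scans summed over its group.
import Mathlib
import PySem

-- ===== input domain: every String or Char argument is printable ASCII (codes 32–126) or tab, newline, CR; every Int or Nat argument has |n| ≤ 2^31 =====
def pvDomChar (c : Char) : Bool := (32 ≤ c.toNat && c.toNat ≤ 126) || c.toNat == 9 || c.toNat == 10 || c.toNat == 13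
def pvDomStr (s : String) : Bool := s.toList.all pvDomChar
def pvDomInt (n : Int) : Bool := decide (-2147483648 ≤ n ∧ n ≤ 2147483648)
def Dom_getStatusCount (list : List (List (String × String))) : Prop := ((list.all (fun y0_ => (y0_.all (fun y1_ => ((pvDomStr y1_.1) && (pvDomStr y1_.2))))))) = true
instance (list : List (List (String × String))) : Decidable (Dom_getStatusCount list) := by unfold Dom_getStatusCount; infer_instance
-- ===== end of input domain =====

-- B replaces A's one-pass 18-variable elif accumulator chain by a declarative group table: the
-- status column is extracted once and each output key is a sum of per-member count scans (objective: simpler).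

-- ===== PORT A =====
-- item['Agent Status'] raises KeyError when the key is missing; Pre_ excludes that input, so the `.getD ""` default is never read.
def pvStatusA (item : List (String × String)) : String :=
  ((PySem.Dict.mk item).get? "Agent Status").getD ""

-- the for-loop of A: one Int accumulator per counter variable, branches in A's order
def pvLoopA : List (List (String × String)) → Int → Int → Int → Int → Int → Int → Int → Int → Int → Int → Int → Int → Int → Int → Int → Int → Int → Int → List (String × Int)
  | [], av, off, ap, _bw, bl, _gb, _mp, _iv, me, _or, pr, sh, tw, ce, fu, cg, cd, en =>
      [("Projects", pr), ("Tweeters", tw), ("Closer/Expert Calls", ce),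
       ("Follow-Up Work", en + fu), ("On a Call", cg + cd), ("Available", av),
       ("Offline", off), ("Shadowing", sh), ("Break/Lunch", bl),
       ("Apprenticeship", ap), ("Meetings", me)]
  | item :: rest, av, off, ap, bw, bl, gb, mp, iv, me, or_, pr, sh, tw, ce, fu, cg, cd, en =>
      if pvStatusA item = "Available" then pvLoopA rest (av+1) off ap bw bl gb mp iv me or_ pr sh tw ce fu cg cd en
      else if pvStatusA item = "Offline" then pvLoopA rest av (off+1) ap bw bl gb mp iv me or_ pr sh tw ce fu cg cd en
      else if pvStatusA item = "Apprenticeship" then pvLoopA rest av off (ap+1) bw bl gb mp iv me or_ pr sh tw ce fu cg cd en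
      else if pvStatusA item = "Bi-weekly" then pvLoopA rest av off ap (bw+1) bl gb mp iv me or_ pr sh tw ce fu cg cd en
      else if pvStatusA item = "Break/Lunch" then pvLoopA rest av off ap bw (bl+1) gb mp iv me or_ pr sh tw ce fu cg cd en
      else if pvStatusA item = "GB+" then pvLoopA rest av off ap bw bl (gb+1) mp iv me or_ pr sh tw ce fu cg cd en
      else if pvStatusA item = "MaxPreps" then pvLoopA rest av off ap bw bl gb (mp+1) iv me or_ pr sh tw ce fu cg cd en
      else if pvStatusA item = "Interview" then pvLoopA rest av off ap bw bl gb mp (iv+1) me or_ pr sh tw ce fu cg cd en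
      else if pvStatusA item = "Meetings" then pvLoopA rest av off ap bw bl gb mp iv (me+1) or_ pr sh tw ce fu cg cd en
      else if pvStatusA item = "Orientation" then pvLoopA rest av off ap bw bl gb mp iv me (or_+1) pr sh tw ce fu cg cd en
      else if pvStatusA item = "Projects" then pvLoopA rest av off ap bw bl gb mp iv me or_ (pr+1) sh tw ce fu cg cd en
      else if pvStatusA item = "Shadowing" then pvLoopA rest av off ap bw bl gb mp iv me or_ pr (sh+1) tw ce fu cg cd en
      else if pvStatusA item = "Tweeters" then pvLoopA rest av off ap bw bl gb mp iv me or_ pr sh (tw+1) ce fu cg cd en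
      else if pvStatusA item = "Closer/Expert Calls" then pvLoopA rest av off ap bw bl gb mp iv me or_ pr sh tw (ce+1) fu cg cd en
      else if pvStatusA item = "Follow-Up Work" then pvLoopA rest av off ap bw bl gb mp iv me or_ pr sh tw ce (fu+1) cg cd en
      else if pvStatusA item = "CONNECTING" then pvLoopA rest av off ap bw bl gb mp iv me or_ pr sh tw ce fu (cg+1) cd en
      else if pvStatusA item = "CONNECTED" ∨ pvStatusA item = "CONNECTED_ONHOLD" then pvLoopA rest av off ap bw bl gb mp iv me or_ pr sh tw ce fu cg (cd+1) en
      else if pvStatusA item = "ENDED" then pvLoopA rest av off ap bw bl gb mp iv me or_ pr sh tw ce fu cg cd (en+1)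
      else pvLoopA rest av off ap bw bl gb mp iv me or_ pr sh tw ce fu cg cd en

def getStatusCount (list : List (List (String × String))) : List (String × Int) :=
  pvLoopA list 0 0 0 0 0 0 0 0 0 0 0 0 0 0 0 0 0 0

-- ===== PORT B =====
-- the GROUPS table of Source B
def pvGroups : List (String × List String) :=
  [("Projects", ["Projects"]),
   ("Tweeters", ["Tweeters"]),
   ("Closer/Expert Calls", ["Closer/Expert Calls"]),
   ("Follow-Up Work", ["ENDED", "Follow-Up Work"]),
   ("On a Call", ["CONNECTING", "CONNECTED", "CONNECTED_ONHOLD"]),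
   ("Available", ["Available"]),
   ("Offline", ["Offline"]),
   ("Shadowing", ["Shadowing"]),
   ("Break/Lunch", ["Break/Lunch"]),
   ("Apprenticeship", ["Apprenticeship"]),
   ("Meetings", ["Meetings"])]

-- item['Agent Status'] (KeyError excluded by Pre_, as in port A)
def pvStatusB (item : List (String × String)) : String :=
  ((PySem.Dict.mk item).get? "Agent Status").getD ""

-- statuses = [item['Agent Status'] for item in list];
-- {key: sum(statuses.count(s) for s in members) for key, members in GROUPS}
def getStatusCount_alt (list : List (List (String × String))) : List (String × Int) :=
  let statuses := list.map pvStatusB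
  pvGroups.map (fun g =>
    (g.1, (g.2.map (fun s => (PySem.List.count statuses s : Int))).sum))

-- ===== PRECONDITION & SPEC =====
-- Pre_ excludes exactly the inputs on which Python A raises KeyError (an item without the 'Agent Status' key).
def Pre_getStatusCount (list : List (List (String × String))) : Prop :=
  (list.all (fun item => (PySem.Dict.mk item).contains "Agent Status")) = true
instance (list : List (List (String × String))) : Decidable (Pre_getStatusCount list) := by unfold Pre_getStatusCount; infer_instance
def pvWitness_getStatusCount : (List (List (String × String))) :=
  [[("Agent Status", "Available")], [("Agent Status", "ENDED")]]

def Spec_getStatusCount (list : List (List (String × String))) (out : List (String × Int)) : Prop := out = getStatusCount_alt list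
instance (list : List (List (String × String))) (out : List (String × Int)) : Decidable (Spec_getStatusCount list out) := by unfold Spec_getStatusCount; infer_instance

-- ===== CLAIM (what is proved, stated in full; the proofs are below) =====
def Claim_equal_getStatusCount : Prop := ∀ (list : List (List (String × String))), Dom_getStatusCount list → Pre_getStatusCount list → Spec_getStatusCount list (getStatusCount list)

-- ===== LEMMAS AND PROOFS =====

-- count of a literal status in the mapped status list, as an Int
def pvCnt (l : List (List (String × String))) (s : String) : Int :=
  ((l.map pvStatusA).count s : Int)

theorem pvCnt_nil (s : String) : pvCnt [] s = 0 := rfl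

theorem pvCnt_cons (item : List (String × String)) (l : List (List (String × String))) (s : String) :
    pvCnt (item :: l) s = pvCnt l s + (if s = pvStatusA item then 1 else 0) := by
  rcases eq_or_ne s (pvStatusA item) with h | h
  · subst h; simp [pvCnt]
  · simp [pvCnt, List.count_cons, h]
    exact fun e => h e.symm

set_option maxHeartbeats 2000000 in
theorem pvLoopA_closed (l : List (List (String × String)))
    (av off ap bw bl gb mp iv me or_ pr sh tw ce fu cg cd en : Int) :
    pvLoopA l av off ap bw bl gb mp iv me or_ pr sh tw ce fu cg cd en =
      [("Projects", pr + pvCnt l "Projects"), ("Tweeters", tw + pvCnt l "Tweeters"),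
       ("Closer/Expert Calls", ce + pvCnt l "Closer/Expert Calls"),
       ("Follow-Up Work", (en + pvCnt l "ENDED") + (fu + pvCnt l "Follow-Up Work")),
       ("On a Call", (cg + pvCnt l "CONNECTING") + (cd + pvCnt l "CONNECTED" + pvCnt l "CONNECTED_ONHOLD")),
       ("Available", av + pvCnt l "Available"), ("Offline", off + pvCnt l "Offline"),
       ("Shadowing", sh + pvCnt l "Shadowing"), ("Break/Lunch", bl + pvCnt l "Break/Lunch"),
       ("Apprenticeship", ap + pvCnt l "Apprenticeship"), ("Meetings", me + pvCnt l "Meetings")] := by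
  induction l generalizing av off ap bw bl gb mp iv me or_ pr sh tw ce fu cg cd en with
  | nil => simp [pvLoopA, pvCnt_nil]
  | cons item rest ih =>
      simp only [pvLoopA]
      by_cases h1 : pvStatusA item = "Available"
      · rw [if_pos h1, ih]
        simp [pvCnt_cons, h1]
        all_goals omega
      by_cases h2 : pvStatusA item = "Offline"
      · rw [if_neg h1, if_pos h2, ih]
        simp [pvCnt_cons, h2]
        all_goals omega
      by_cases h3 : pvStatusA item = "Apprenticeship"
      · rw [if_neg h1, if_neg h2, if_pos h3, ih]
        simp [pvCnt_cons, h3]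
        all_goals omega
      by_cases h4 : pvStatusA item = "Bi-weekly"
      · rw [if_neg h1, if_neg h2, if_neg h3, if_pos h4, ih]
        simp [pvCnt_cons, h4]
      by_cases h5 : pvStatusA item = "Break/Lunch"
      · rw [if_neg h1, if_neg h2, if_neg h3, if_neg h4, if_pos h5, ih]
        simp [pvCnt_cons, h5]
        all_goals omega
      by_cases h6 : pvStatusA item = "GB+"
      · rw [if_neg h1, if_neg h2, if_neg h3, if_neg h4, if_neg h5, if_pos h6, ih]
        simp [pvCnt_cons, h6]
      by_cases h7 : pvStatusA item = "MaxPreps"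
      · rw [if_neg h1, if_neg h2, if_neg h3, if_neg h4, if_neg h5, if_neg h6, if_pos h7, ih]
        simp [pvCnt_cons, h7]
      by_cases h8 : pvStatusA item = "Interview"
      · rw [if_neg h1, if_neg h2, if_neg h3, if_neg h4, if_neg h5, if_neg h6, if_neg h7, if_pos h8, ih]
        simp [pvCnt_cons, h8]
      by_cases h9 : pvStatusA item = "Meetings"
      · rw [if_neg h1, if_neg h2, if_neg h3, if_neg h4, if_neg h5, if_neg h6, if_neg h7, if_neg h8, if_pos h9, ih]
        simp [pvCnt_cons, h9]
        all_goals omega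
      by_cases h10 : pvStatusA item = "Orientation"
      · rw [if_neg h1, if_neg h2, if_neg h3, if_neg h4, if_neg h5, if_neg h6, if_neg h7, if_neg h8, if_neg h9, if_pos h10, ih]
        simp [pvCnt_cons, h10]
      by_cases h11 : pvStatusA item = "Projects"
      · rw [if_neg h1, if_neg h2, if_neg h3, if_neg h4, if_neg h5, if_neg h6, if_neg h7, if_neg h8, if_neg h9, if_neg h10, if_pos h11, ih]
        simp [pvCnt_cons, h11]
        all_goals omega
      by_cases h12 : pvStatusA item = "Shadowing"
      · rw [if_neg h1, if_neg h2, if_neg h3, if_neg h4, if_neg h5, if_neg h6, if_neg h7, if_neg h8, if_neg h9, if_neg h10, if_neg h11, if_pos h12, ih]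
        simp [pvCnt_cons, h12]
        all_goals omega
      by_cases h13 : pvStatusA item = "Tweeters"
      · rw [if_neg h1, if_neg h2, if_neg h3, if_neg h4, if_neg h5, if_neg h6, if_neg h7, if_neg h8, if_neg h9, if_neg h10, if_neg h11, if_neg h12, if_pos h13, ih]
        simp [pvCnt_cons, h13]
        all_goals omega
      by_cases h14 : pvStatusA item = "Closer/Expert Calls"
      · rw [if_neg h1, if_neg h2, if_neg h3, if_neg h4, if_neg h5, if_neg h6, if_neg h7, if_neg h8, if_neg h9, if_neg h10, if_neg h11, if_neg h12, if_neg h13, if_pos h14, ih]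
        simp [pvCnt_cons, h14]
        all_goals omega
      by_cases h15 : pvStatusA item = "Follow-Up Work"
      · rw [if_neg h1, if_neg h2, if_neg h3, if_neg h4, if_neg h5, if_neg h6, if_neg h7, if_neg h8, if_neg h9, if_neg h10, if_neg h11, if_neg h12, if_neg h13, if_neg h14, if_pos h15, ih]
        simp [pvCnt_cons, h15]
        all_goals omega
      by_cases h16 : pvStatusA item = "CONNECTING"
      · rw [if_neg h1, if_neg h2, if_neg h3, if_neg h4, if_neg h5, if_neg h6, if_neg h7, if_neg h8, if_neg h9, if_neg h10, if_neg h11, if_neg h12, if_neg h13, if_neg h14, if_neg h15, if_pos h16, ih]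
        simp [pvCnt_cons, h16]
        all_goals omega
      by_cases h17 : pvStatusA item = "CONNECTED" ∨ pvStatusA item = "CONNECTED_ONHOLD"
      · rw [if_neg h1, if_neg h2, if_neg h3, if_neg h4, if_neg h5, if_neg h6, if_neg h7, if_neg h8, if_neg h9, if_neg h10, if_neg h11, if_neg h12, if_neg h13, if_neg h14, if_neg h15, if_neg h16, if_pos h17, ih]
        rcases h17 with h | h <;> simp [pvCnt_cons, h] <;> all_goals omega
      by_cases h18 : pvStatusA item = "ENDED"
      · rw [if_neg h1, if_neg h2, if_neg h3, if_neg h4, if_neg h5, if_neg h6, if_neg h7, if_neg h8, if_neg h9, if_neg h10, if_neg h11, if_neg h12, if_neg h13, if_neg h14, if_neg h15, if_neg h16, if_neg h17, if_pos h18, ih]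
        simp [pvCnt_cons, h18]
        all_goals omega
      rw [if_neg h1, if_neg h2, if_neg h3, if_neg h4, if_neg h5, if_neg h6, if_neg h7, if_neg h8,
        if_neg h9, if_neg h10, if_neg h11, if_neg h12, if_neg h13, if_neg h14, if_neg h15,
        if_neg h16, if_neg h17, if_neg h18, ih]
      push Not at h17
      simp [pvCnt_cons, Ne.symm h1, Ne.symm h2, Ne.symm h3, Ne.symm h5, Ne.symm h9,
        Ne.symm h11, Ne.symm h12, Ne.symm h13, Ne.symm h14, Ne.symm h15, Ne.symm h16,
        Ne.symm h17.1, Ne.symm h17.2, Ne.symm h18]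

theorem getStatusCount_alt_closed (list : List (List (String × String))) :
    getStatusCount_alt list =
      [("Projects", pvCnt list "Projects"), ("Tweeters", pvCnt list "Tweeters"),
       ("Closer/Expert Calls", pvCnt list "Closer/Expert Calls"),
       ("Follow-Up Work", pvCnt list "ENDED" + pvCnt list "Follow-Up Work"),
       ("On a Call", pvCnt list "CONNECTING" + pvCnt list "CONNECTED" + pvCnt list "CONNECTED_ONHOLD"),
       ("Available", pvCnt list "Available"), ("Offline", pvCnt list "Offline"),
       ("Shadowing", pvCnt list "Shadowing"), ("Break/Lunch", pvCnt list "Break/Lunch"),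
       ("Apprenticeship", pvCnt list "Apprenticeship"), ("Meetings", pvCnt list "Meetings")] := by
  have hBA : pvStatusB = pvStatusA := rfl
  simp [getStatusCount_alt, pvGroups, PySem.List.count_eq, pvCnt, hBA, add_assoc]

-- ===== VERDICT (by name: the statement is the Claim_ definition above) =====
theorem getStatusCount_spec : Claim_equal_getStatusCount := by
  intro list _ _
  unfold Spec_getStatusCount getStatusCount
  rw [pvLoopA_closed, getStatusCount_alt_closed]
  norm_num [add_assoc]
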